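-- pv_equiv track=rewrite | github.com/neilneil2000/advent-of-code-2023 | Day5/day5.py | reprocess_seeds
-- ===== SOURCE A (Python) =====
-- def reprocess_seeds(old_seeds):
--     new_seeds = []
--     cache = 0
--     for index, entry in enumerate(old_seeds):
--         if index % 2 == 0:
--             cache = entry
--         else:
--             new_seeds.append((cache, entry + cache - 1))
--
--     return new_seeds
-- ===== SOURCE B (Python) =====
-- def reprocess_seeds(old_seeds):
--     stack = list(old_seeds)
--     if len(stack) % 2:
--         stack.pop()  # a trailing start with no length contributes nothing
--     new_seeds = []
--     while stack:
--         length = stack.pop()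
--         start = stack.pop()
--         new_seeds.append((start, start + length - 1))
--     new_seeds.reverse()
--     return new_seeds
-- ===== Notes on version B (the rewrite author's own statement) =====
-- stated objective: alternative
-- what changed: Replaces A's forward indexed loop with a parity branch and a carried cache by a stack algorithm: copy the list, drop a dangling trailing element, repeatedly pop length then start off the END of the stack building the output back-to-front, and reverse the output once at the end; no index, no parity test, no cross-iteration cache.
import Mathlib
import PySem

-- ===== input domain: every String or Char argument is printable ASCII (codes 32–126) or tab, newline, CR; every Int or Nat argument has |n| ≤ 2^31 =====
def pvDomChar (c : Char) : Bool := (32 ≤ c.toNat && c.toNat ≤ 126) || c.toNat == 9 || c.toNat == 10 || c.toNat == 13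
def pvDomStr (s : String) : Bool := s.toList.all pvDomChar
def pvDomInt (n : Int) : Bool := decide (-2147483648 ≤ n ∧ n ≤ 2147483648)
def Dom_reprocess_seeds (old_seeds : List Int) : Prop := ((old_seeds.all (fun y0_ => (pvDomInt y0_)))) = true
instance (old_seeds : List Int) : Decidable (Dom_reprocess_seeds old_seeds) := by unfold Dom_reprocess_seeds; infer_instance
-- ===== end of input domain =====

-- B replaces A's indexed loop (parity branch + carried cache) by an explicit-stack
-- algorithm: pop (length, start) pairs off the end, build the output back-to-front,
-- reverse once; same O(n) cost, a different traversal order.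


-- ===== PORT A =====
-- for index, entry in enumerate(old_seeds): if index % 2 == 0: cache = entry else: append (cache, entry+cache-1)
def reprocess_seeds (old_seeds : List Int) : List (Int × Int) :=
  ((PySem.List.enumerate old_seeds 0).foldl
    (fun (st : List (Int × Int) × Int) (p : Int × Int) =>
      if p.1 % 2 == 0 then (st.1, p.2)
      else (st.1 ++ [(st.2, p.2 + st.2 - 1)], st.2))
    ([], 0)).1

-- ===== PORT B =====
-- while stack: length = stack.pop(); start = stack.pop(); new_seeds.append(...)
-- popping from the end = consuming the reversed stack from the front.
def reprocessPopLoop (revStack : List Int) (new_seeds : List (Int × Int)) : List (Int × Int) :=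
  match revStack with
  | length :: start :: rest => reprocessPopLoop rest (new_seeds ++ [(start, start + length - 1)])
  | _ => new_seeds

-- stack = list(old_seeds); if odd length, pop the dangling trailing element;
-- run the pop loop; new_seeds.reverse() at the end.
def reprocess_seeds_alt (old_seeds : List Int) : List (Int × Int) :=
  let stack := if old_seeds.length % 2 == 1 then old_seeds.dropLast else old_seeds
  (reprocessPopLoop stack.reverse []).reverse

-- ===== PRECONDITION & SPEC =====
def Spec_reprocess_seeds (old_seeds : List Int) (out : List (Int × Int)) : Prop := out = reprocess_seeds_alt old_seeds
instance (old_seeds : List Int) (out : List (Int × Int)) : Decidable (Spec_reprocess_seeds old_seeds out) := by unfold Spec_reprocess_seeds; infer_instance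

-- ===== CLAIM (what is proved, stated in full; the proofs are below) =====
def Claim_equal_reprocess_seeds : Prop := ∀ (old_seeds : List Int), Dom_reprocess_seeds old_seeds → Spec_reprocess_seeds old_seeds (reprocess_seeds old_seeds)

-- ===== LEMMAS AND PROOFS =====
-- Common characterisation: pair up consecutive (start, length) elements.
def pairUp : List Int → List (Int × Int)
  | s :: l :: r => (s, s + l - 1) :: pairUp r
  | _ => []

-- Loop invariant for A: starting the fold at an even index 2*m with any cache c and
-- accumulated output acc, the final output is acc followed by pairUp of the rest.
theorem reprocess_seeds_fold_inv (xs : List Int) :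
    ∀ (acc : List (Int × Int)) (c m : Int),
      ((PySem.List.enumerate xs (2 * m)).foldl
        (fun (st : List (Int × Int) × Int) (p : Int × Int) =>
          if p.1 % 2 == 0 then (st.1, p.2)
          else (st.1 ++ [(st.2, p.2 + st.2 - 1)], st.2))
        (acc, c)).1 = acc ++ pairUp xs := by
  match xs with
  | [] => intro acc c m; simp [PySem.List.enumerate_nil, pairUp]
  | [x] =>
      intro acc c m
      have h : (2 * m) % 2 = 0 := by omega
      simp [PySem.List.enumerate_cons, PySem.List.enumerate_nil, pairUp]
  | x :: y :: r =>
      intro acc c m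
      have he : (2 * m) % 2 = 0 := by omega
      have ho : (2 * m + 1) % 2 = 1 := by omega
      have ih := reprocess_seeds_fold_inv r (acc ++ [(x, y + x - 1)]) x (m + 1)
      have harg : 2 * m + 1 + 1 = 2 * (m + 1) := by ring
      simp only [PySem.List.enumerate_cons, List.foldl_cons, harg, beq_iff_eq, he, ho,
        one_ne_zero, if_false, if_true] at *
      have hxy : y + x - 1 = x + y - 1 := by ring
      simpa [pairUp, hxy] using ih

-- The pop loop splits over an append whose first part has even length.
theorem reprocessPopLoop_append (u : List Int) :
    ∀ (v : List Int) (acc : List (Int × Int)), u.length % 2 = 0 →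
      reprocessPopLoop (u ++ v) acc = reprocessPopLoop v (reprocessPopLoop u acc) := by
  match u with
  | [] => intro v acc _; simp [reprocessPopLoop]
  | [a] => intro v acc h; simp at h
  | a :: b :: w =>
      intro v acc h
      have hw : w.length % 2 = 0 := by simp at h; omega
      simpa [reprocessPopLoop] using reprocessPopLoop_append w v (acc ++ [(b, b + a - 1)]) hw

-- The pop loop over the reversed list yields pairUp reversed (even-length lists).
theorem reprocessPopLoop_reverse (xs : List Int) :
    ∀ (acc : List (Int × Int)), xs.length % 2 = 0 →
      reprocessPopLoop xs.reverse acc = acc ++ (pairUp xs).reverse := by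
  match xs with
  | [] => intro acc _; simp [reprocessPopLoop, pairUp]
  | [a] => intro acc h; simp at h
  | s :: l :: r =>
      intro acc h
      have hr : r.length % 2 = 0 := by simp at h; omega
      have hrev : (s :: l :: r).reverse = r.reverse ++ [l, s] := by simp
      have hrl : (r.reverse).length % 2 = 0 := by simpa using hr
      rw [hrev, reprocessPopLoop_append r.reverse [l, s] acc hrl,
        reprocessPopLoop_reverse r acc hr]
      simp [reprocessPopLoop, pairUp]

-- Dropping a dangling trailing element does not change the pairing.
theorem pairUp_dropLast (xs : List Int) (h : xs.length % 2 = 1) :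
    pairUp xs.dropLast = pairUp xs := by
  match xs with
  | [] => simp at h
  | [a] => simp [pairUp]
  | s :: l :: r =>
      have hr : r.length % 2 = 1 := by simp at h; omega
      have hne : r ≠ [] := by intro hc; rw [hc] at hr; simp at hr
      have : (s :: l :: r).dropLast = s :: l :: r.dropLast := by
        simp [List.dropLast_cons_of_ne_nil, hne]
      rw [this]
      simp [pairUp, pairUp_dropLast r hr]

theorem reprocess_seeds_alt_eq_pairUp (xs : List Int) :
    reprocess_seeds_alt xs = pairUp xs := by
  unfold reprocess_seeds_alt
  by_cases h : xs.length % 2 = 1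
  · have hd : (xs.dropLast).length % 2 = 0 := by
      rcases xs with _ | ⟨a, t⟩
      · simp at h
      · simp [List.length_dropLast] at *; omega
    simp only [h, beq_iff_eq, if_true]
    rw [reprocessPopLoop_reverse _ [] hd]
    simp [pairUp_dropLast xs h]
  · have h0 : xs.length % 2 = 0 := by omega
    have : (xs.length % 2 == 1) = false := by simp [h]
    simp only [this, if_false, Bool.false_eq_true]
    rw [reprocessPopLoop_reverse _ [] h0]
    simp

-- ===== VERDICT (by name: the statement is the Claim_ definition above) =====
theorem reprocess_seeds_spec : Claim_equal_reprocess_seeds := by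
  intro xs _
  unfold Spec_reprocess_seeds reprocess_seeds
  rw [reprocess_seeds_alt_eq_pairUp]
  simpa using reprocess_seeds_fold_inv xs [] 0 0
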